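-- pv_equiv track=rewrite | github.com/orionzhou/maize | vnt.recover.py | vnt_apply
-- ===== SOURCE A (Python) =====
-- def vnt_apply(seq, vdic):
--     vseq = list(seq)
--     for pos, vnt in vdic.items():
--         if pos < 1 or pos > len(seq):
--             continue
--         ref, alt, qd = vnt
--         idx = pos - 1
--         assert ref == vseq[idx], "refseq conflict: %d:%s:%s" % (pos, ref, alt)
--         vseq[idx] = alt
--     return ''.join(vseq)
-- ===== SOURCE B (Python) =====
-- def vnt_apply(seq, vdic):
--     # Collect validated in-range substitutions as (index, alt) edits,
--     # sort them by index, then splice: copy untouched slices of seq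
--     # between consecutive edit points and insert each alt in between.
--     edits = []
--     for pos, vnt in vdic.items():
--         if pos < 1 or pos > len(seq):
--             continue
--         ref, alt, qd = vnt
--         assert ref == seq[pos - 1], "refseq conflict: %d:%s:%s" % (pos, ref, alt)
--         edits.append((pos - 1, alt))
--     edits.sort(key=lambda t: t[0])
--     parts = []
--     prev = 0
--     for idx, alt in edits:
--         parts.append(seq[prev:idx])
--         parts.append(alt)
--         prev = idx + 1
--     return ''.join(parts) + seq[prev:]
-- ===== Notes on version B (the rewrite author's own statement) =====
-- stated objective: alternative
-- what changed: A mutates a list copy of seq position by position and joins it; B collects the validated (index, alt) edits, sorts them by index, and splices the result from untouched slices of the original seq with the alts inserted between them.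
import Mathlib
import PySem

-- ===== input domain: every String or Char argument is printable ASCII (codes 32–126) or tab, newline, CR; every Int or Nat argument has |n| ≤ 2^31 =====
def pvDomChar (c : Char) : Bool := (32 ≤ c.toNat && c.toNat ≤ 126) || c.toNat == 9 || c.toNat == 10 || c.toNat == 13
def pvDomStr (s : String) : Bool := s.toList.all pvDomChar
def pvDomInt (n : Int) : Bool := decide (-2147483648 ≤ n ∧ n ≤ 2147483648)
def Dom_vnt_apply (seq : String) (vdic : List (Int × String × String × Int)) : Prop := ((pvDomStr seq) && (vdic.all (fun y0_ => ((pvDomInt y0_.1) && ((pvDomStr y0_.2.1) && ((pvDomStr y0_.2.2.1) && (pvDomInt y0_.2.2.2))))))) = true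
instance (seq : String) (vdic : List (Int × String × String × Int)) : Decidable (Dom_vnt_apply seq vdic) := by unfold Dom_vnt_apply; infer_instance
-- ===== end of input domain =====

-- B replaces A's in-place mutation over every position by collect-validated-edits,
-- sort by position, then splice untouched slices of seq around the inserted alts
-- (alternative decomposition: sort-and-splice instead of pointwise mutation).


-- ===== PORT A =====
-- vseq = list(seq); mutate in place; ''.join(vseq).  The assert-failure branch (outside Pre_) leaves vs unchanged.
def vnt_apply (seq : String) (vdic : List (Int × String × String × Int)) : String :=
  let s := seq.toList
  let vseq : List (List Char) := s.map (fun c => [c])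
  let final := vdic.foldl (fun (vs : List (List Char)) e =>
    if e.1 < 1 ∨ e.1 > (s.length : Int) then vs
    else
      let idx := (e.1 - 1).toNat
      if e.2.1.toList = vs.getD idx [] then vs.set idx e.2.2.1.toList else vs) vseq
  String.ofList (PySem.Chars.join [] final)

-- ===== PORT B =====
-- collect validated (index, alt) edits (same loop order and checks; assert failure outside Pre_),
-- sort by index, then splice: parts of the original seq between edit points with alts in between.
def vnt_apply_alt (seq : String) (vdic : List (Int × String × String × Int)) : String :=
  let s := seq.toList
  let edits := vdic.foldl (fun (acc : List (Int × List Char)) e =>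
    if e.1 < 1 ∨ e.1 > (s.length : Int) then acc
    else if e.2.1.toList = [s.getD (e.1 - 1).toNat ' '] then acc ++ [(e.1 - 1, e.2.2.1.toList)]
    else acc) []
  let sedits := PySem.List.sorted edits (fun t => t.1)
  let fin := sedits.foldl (fun (p : List (List Char) × Int) t =>
      (p.1 ++ [PySem.List.slice s (some p.2) (some t.1), t.2], t.1 + 1)) ([], 0)
  String.ofList (PySem.Chars.join [] fin.1 ++ PySem.List.slice s (some fin.2) none)

-- ===== PRECONDITION & SPEC =====
-- Pre_ excludes (i) entries whose in-range ref does not equal the sequence character there — on those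
-- Python A raises AssertionError — and (ii) association lists with duplicate positions, which do not
-- correspond to any Python dict input (dict keys are unique), so nothing A returns on is excluded by (ii).
def Pre_vnt_apply (seq : String) (vdic : List (Int × String × String × Int)) : Prop :=
  (vdic.map (fun e => e.1)).Nodup ∧
  ∀ e ∈ vdic, ¬(e.1 < 1 ∨ e.1 > (seq.toList.length : Int)) →
    e.2.1.toList = [seq.toList.getD (e.1 - 1).toNat ' ']
instance (seq : String) (vdic : List (Int × String × String × Int)) : Decidable (Pre_vnt_apply seq vdic) := by unfold Pre_vnt_apply; infer_instance

def pvWitness_vnt_apply : String × (List (Int × String × String × Int)) :=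
  ("ACGT", [(1, ("A", "G", 30)), (3, ("G", "TT", 12)), (9, ("A", "C", 7))])

def Spec_vnt_apply (seq : String) (vdic : List (Int × String × String × Int)) (out : String) : Prop := out = vnt_apply_alt seq vdic
instance (seq : String) (vdic : List (Int × String × String × Int)) (out : String) : Decidable (Spec_vnt_apply seq vdic out) := by unfold Spec_vnt_apply; infer_instance

-- ===== CLAIM (what is proved, stated in full; the proofs are below) =====
def Claim_equal_vnt_apply : Prop := ∀ (seq : String) (vdic : List (Int × String × String × Int)), Dom_vnt_apply seq vdic → Pre_vnt_apply seq vdic → Spec_vnt_apply seq vdic (vnt_apply seq vdic)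

-- ===== LEMMAS AND PROOFS =====

-- first-match lookup in an edit list
def pvLk (l : List (Int × List Char)) (k : Int) : Option (List Char) :=
  (l.find? (fun t => t.1 == k)).map (fun t => t.2)

-- the loop bodies
def pvStepA (s : List Char) (vs : List (List Char)) (e : Int × String × String × Int) : List (List Char) :=
  if e.1 < 1 ∨ e.1 > (s.length : Int) then vs
  else
    let idx := (e.1 - 1).toNat
    if e.2.1.toList = vs.getD idx [] then vs.set idx e.2.2.1.toList else vs

def pvStepC (s : List Char) (acc : List (Int × List Char)) (e : Int × String × String × Int) : List (Int × List Char) :=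
  if e.1 < 1 ∨ e.1 > (s.length : Int) then acc
  else if e.2.1.toList = [s.getD (e.1 - 1).toNat ' '] then acc ++ [(e.1 - 1, e.2.2.1.toList)]
  else acc

def pvStepS (s : List Char) (p : List (List Char) × Int) (t : Int × List Char) : List (List Char) × Int :=
  (p.1 ++ [PySem.List.slice s (some p.2) (some t.1), t.2], t.1 + 1)

theorem pvLk_append_single (acc : List (Int × List Char)) (i : Int) (a : List Char) (k : Int) :
    pvLk (acc ++ [(i, a)]) k =
      match pvLk acc k with
      | some v => some v
      | none => if i = k then some a else none := by
  unfold pvLk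
  rw [List.find?_append]
  cases h : acc.find? (fun t => t.1 == k) <;> simp [List.find?]
  split_ifs with hik
  · simp [hik]
  · have hb : (i == k) = false := by simpa using hik
    simp [hb]

theorem pvLk_none_iff (acc : List (Int × List Char)) (k : Int) :
    pvLk acc k = none ↔ ∀ t ∈ acc, t.1 ≠ k := by
  unfold pvLk
  simp [List.find?_eq_none]

theorem pvLk_perm (acc acc' : List (Int × List Char)) (k : Int)
    (hp : acc.Perm acc') (hnd : (acc.map (fun t => t.1)).Nodup) :
    pvLk acc k = pvLk acc' k := by
  cases h : pvLk acc k with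
  | none =>
    rw [pvLk_none_iff] at h
    exact ((pvLk_none_iff acc' k).mpr (fun t ht => h t (hp.mem_iff.mpr ht))).symm
  | some v =>
    unfold pvLk at h ⊢
    cases hf : acc.find? (fun t => t.1 == k) with
    | none => rw [hf] at h; simp at h
    | some t0 =>
      rw [hf] at h
      simp at h
      have ht0m : t0 ∈ acc := List.mem_of_find?_eq_some hf
      have ht0k : t0.1 = k := by simpa using List.find?_some hf
      cases hf' : acc'.find? (fun t => t.1 == k) with
      | none =>
        rw [List.find?_eq_none] at hf'
        exact absurd (by simpa using ht0k) (hf' t0 (hp.mem_iff.mp ht0m))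
      | some t1 =>
        have ht1m : t1 ∈ acc := hp.mem_iff.mpr (List.mem_of_find?_eq_some hf')
        have ht1k : t1.1 = k := by simpa using List.find?_some hf'
        have : t0 = t1 := List.inj_on_of_nodup_map hnd ht0m ht1m (ht0k.trans ht1k.symm)
        rw [← h, this]; rfl

-- joint loop invariant: A's mutable list vs B's collected edit list
theorem pv_loop (s : List Char) :
    ∀ (l : List (Int × String × String × Int)) (vs : List (List Char)) (acc : List (Int × List Char)),
    vs.length = s.length →
    (∀ k : Nat, k < s.length → vs.getD k [] = (pvLk acc (k : Int)).getD [s.getD k ' ']) →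
    (∀ e ∈ l, pvLk acc (e.1 - 1) = none) →
    (l.map (fun e => e.1)).Nodup →
    (∀ e ∈ l, ¬(e.1 < 1 ∨ e.1 > (s.length : Int)) → e.2.1.toList = [s.getD (e.1 - 1).toNat ' ']) →
    ((acc.map (fun t => t.1)).Nodup ∧ ∀ t ∈ acc, 0 ≤ t.1 ∧ t.1 < (s.length : Int)) →
    (l.foldl (pvStepA s) vs).length = s.length ∧
    (∀ k : Nat, k < s.length →
      (l.foldl (pvStepA s) vs).getD k [] = (pvLk (l.foldl (pvStepC s) acc) (k : Int)).getD [s.getD k ' ']) ∧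
    ((l.foldl (pvStepC s) acc).map (fun t => t.1)).Nodup ∧
    (∀ t ∈ l.foldl (pvStepC s) acc, 0 ≤ t.1 ∧ t.1 < (s.length : Int)) := by
  intro l
  induction l with
  | nil => intro vs acc hlen hinv _ _ _ hbnd; exact ⟨hlen, hinv, hbnd.1, hbnd.2⟩
  | cons e tl ih =>
    intro vs acc hlen hinv hfresh hnd hpre hbnd
    simp only [List.foldl_cons]
    have hndtl : (List.map (fun e => e.1) tl).Nodup := by
      have h := hnd; rw [List.map_cons, List.nodup_cons] at h; exact h.2
    by_cases hr : e.1 < 1 ∨ e.1 > (s.length : Int)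
    · have hA : pvStepA s vs e = vs := by simp [pvStepA, hr]
      have hC : pvStepC s acc e = acc := by simp [pvStepC, hr]
      rw [hA, hC]
      exact ih vs acc hlen hinv (fun e' he' => hfresh e' (List.mem_cons_of_mem _ he'))
        hndtl (fun e' he' => hpre e' (List.mem_cons_of_mem _ he')) hbnd
    · have h1 : 1 ≤ e.1 := by omega
      have h2 : e.1 ≤ (s.length : Int) := by omega
      set idx := (e.1 - 1).toNat with hidx
      have hidxlt : idx < s.length := by omega
      have hcast : ((idx : Nat) : Int) = e.1 - 1 := by omega
      have hrefpre : e.2.1.toList = [s.getD idx ' '] := hpre e (List.mem_cons_self) hr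
      have hafree : pvLk acc (e.1 - 1) = none := hfresh e (List.mem_cons_self)
      have hvsidx : vs.getD idx [] = [s.getD idx ' '] := by
        rw [hinv idx hidxlt, hcast, hafree]; rfl
      have hcond : e.2.1.toList = vs.getD idx [] := hrefpre.trans hvsidx.symm
      have hA : pvStepA s vs e = vs.set idx e.2.2.1.toList := by
        simp only [pvStepA, if_neg hr, ← hidx, if_pos hcond]
      have hC : pvStepC s acc e = acc ++ [(e.1 - 1, e.2.2.1.toList)] := by
        simp [pvStepC, hr, ← hidx, hrefpre]
      rw [hA, hC]
      apply ih
      · simpa using hlen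
      · intro k hk
        rw [pvLk_append_single]
        by_cases hke : k = idx
        · subst hke
          rw [List.getD_eq_getElem _ _ (by simpa [hlen] using hk),
            List.getElem_set_self (by simpa [hlen] using hidxlt)]
          simp [hcast, hafree]
        · have hne : e.1 - 1 ≠ (k : Int) := by omega
          have hset : (vs.set idx e.2.2.1.toList).getD k [] = vs.getD k [] := by
            rw [List.getD_eq_getElem _ _ (by rw [List.length_set]; omega),
              List.getD_eq_getElem _ _ (by omega : k < vs.length),
              List.getElem_set_ne (by omega)]
          rw [hset, hinv k hk]
          cases pvLk acc (k : Int) <;> simp [hne]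
      · intro e' he'
        have hne : e'.1 ≠ e.1 := by
          have h := hnd
          rw [List.map_cons, List.nodup_cons] at h
          intro hc
          exact h.1 (hc ▸ List.mem_map_of_mem (f := fun e => e.1) he')
        rw [pvLk_append_single]
        rw [hfresh e' (List.mem_cons_of_mem _ he')]
        have : ¬(e.1 - 1 = e'.1 - 1) := by omega
        simp [this]
      · exact hndtl
      · exact fun e' he' => hpre e' (List.mem_cons_of_mem _ he')
      · constructor
        · rw [List.map_append, List.nodup_append]
          refine ⟨hbnd.1, by simp, ?_⟩
          intro x hx y hy
          rw [List.mem_map] at hx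
          obtain ⟨t, htm, htx⟩ := hx
          have hafree' := (pvLk_none_iff acc (e.1 - 1)).mp hafree
          rw [List.map_cons, List.map_nil, List.mem_singleton] at hy
          intro hxy
          exact hafree' t htm (htx.trans (hxy.trans hy))
        · intro t ht
          rw [List.mem_append] at ht
          rcases ht with ht | ht
          · exact hbnd.2 t ht
          · rw [List.mem_singleton] at ht
            subst ht
            constructor <;> simp <;> omega

-- a contiguous untouched segment reproduces the original characters
theorem pv_seg (s : List Char) (prev m : Nat) (h : prev + m ≤ s.length) :
    (List.range' prev m).flatMap (fun k => [s.getD k ' ']) = (s.drop prev).take m := by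
  induction m generalizing prev with
  | zero => simp
  | succ m ih =>
    have hlt : prev < s.length := by omega
    rw [List.range'_succ, List.flatMap_cons, ih (prev + 1) (by omega),
      List.drop_eq_getElem_cons hlt, List.take_succ_cons,
      List.getD_eq_getElem _ _ hlt]
    rfl

-- join with empty separator is flatten
theorem pv_join_nil_flatten : ∀ (l : List (List Char)), PySem.Chars.join [] l = l.flatten := by
  intro l
  induction l with
  | nil => simp [PySem.Chars.join_nil]
  | cons a t ih =>
    cases t with
    | nil => simp [PySem.Chars.join_singleton]
    | cons b t2 =>
      rw [PySem.Chars.join_cons_cons, List.flatten_cons, ih]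
      simp

-- the splice loop over a strictly increasing edit list
theorem pv_splice (s : List Char) :
    ∀ (l : List (Int × List Char)) (prev : Nat) (parts : List (List Char)),
    l.Pairwise (fun a b => a.1 < b.1) →
    (∀ t ∈ l, (prev : Int) ≤ t.1 ∧ t.1 < (s.length : Int)) →
    prev ≤ s.length →
    PySem.Chars.join [] (l.foldl (pvStepS s) (parts, (prev : Int))).1 ++
      PySem.List.slice s (some (l.foldl (pvStepS s) (parts, (prev : Int))).2) none
    = PySem.Chars.join [] parts ++
      (List.range' prev (s.length - prev)).flatMap (fun k : Nat => (pvLk l (k : Int)).getD [s.getD k ' ']) := by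
  intro l
  induction l with
  | nil =>
    intro prev parts _ _ hple
    simp only [List.foldl_nil]
    rw [PySem.List.slice_from_natCast]
    have h1 : (List.range' prev (s.length - prev)).flatMap
        (fun k : Nat => (pvLk [] (k : Int)).getD [s.getD k ' ']) =
        (List.range' prev (s.length - prev)).flatMap (fun k : Nat => [s.getD k ' ']) := by
      simp [pvLk]
    rw [h1, pv_seg s prev (s.length - prev) (by omega),
      List.take_of_length_le (by simp)]
  | cons t rest ih =>
    intro prev parts hpw hbnd hple
    obtain ⟨hki, hkn⟩ := hbnd t (List.mem_cons_self)
    obtain ⟨hhead, htail⟩ := List.pairwise_cons.mp hpw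
    set i := t.1.toNat with hi
    have hit : ((i : Nat) : Int) = t.1 := by omega
    have hprevi : prev ≤ i := by omega
    have hiln : i < s.length := by omega
    rw [List.foldl_cons]
    have hstep : pvStepS s (parts, (prev : Int)) t =
        (parts ++ [PySem.List.slice s (some (prev : Int)) (some t.1), t.2], ((i + 1 : Nat) : Int)) := by
      unfold pvStepS; congr 1; omega
    rw [hstep, ih (i + 1) _ htail
      (fun u hu => ⟨by have := hhead u hu; omega, (hbnd u (List.mem_cons_of_mem _ hu)).2⟩)
      (by omega)]
    rw [pv_join_nil_flatten, pv_join_nil_flatten, List.flatten_append]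
    -- split the range at i
    have hsplit : List.range' prev (s.length - prev) =
        List.range' prev (i - prev) ++ List.range' i (s.length - i) := by
      have h := List.range'_append (s := prev) (m := i - prev) (n := s.length - i) (step := 1)
      rw [show prev + 1 * (i - prev) = i by omega] at h
      rw [show s.length - prev = (i - prev) + (s.length - i) by omega, ← h]
    rw [hsplit, List.flatMap_append]
    -- segment before i: no edit applies
    have hseg1 : (List.range' prev (i - prev)).flatMap
        (fun k : Nat => (pvLk (t :: rest) (k : Int)).getD [s.getD k ' ']) =
        (List.range' prev (i - prev)).flatMap (fun k : Nat => [s.getD k ' ']) := by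
      rw [List.flatMap_def, List.flatMap_def]
      congr 1
      apply List.map_congr_left
      intro k hk
      rw [List.mem_range'_1] at hk
      have hnone : pvLk (t :: rest) (k : Int) = none := by
        rw [pvLk_none_iff]
        intro u hu
        rcases List.mem_cons.mp hu with hu | hu
        · subst hu; omega
        · have := hhead u hu; omega
      rw [hnone]
      rfl
    rw [hseg1, pv_seg s prev (i - prev) (by omega)]
    -- head at i and the tail after i
    have hrng2 : List.range' i (s.length - i) = i :: List.range' (i + 1) (s.length - (i + 1)) := by
      rw [show s.length - i = (s.length - (i + 1)) + 1 by omega, List.range'_succ]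
    rw [hrng2, List.flatMap_cons]
    have hhd : pvLk (t :: rest) ((i : Nat) : Int) = some t.2 := by
      unfold pvLk
      rw [List.find?_cons_of_pos (h := by simp [hit])]
      rfl
    rw [hhd]
    have hseg2 : (List.range' (i + 1) (s.length - (i + 1))).flatMap
        (fun k : Nat => (pvLk (t :: rest) (k : Int)).getD [s.getD k ' ']) =
        (List.range' (i + 1) (s.length - (i + 1))).flatMap
        (fun k : Nat => (pvLk rest (k : Int)).getD [s.getD k ' ']) := by
      rw [List.flatMap_def, List.flatMap_def]
      congr 1
      apply List.map_congr_left
      intro k hk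
      rw [List.mem_range'_1] at hk
      have hne : (t.1 == (k : Int)) = false := by
        simp only [beq_eq_false_iff_ne, ne_eq]
        omega
      unfold pvLk
      rw [List.find?_cons_of_neg (h := by simp [hne])]
    rw [hseg2]
    -- the slice before the edit is exactly the untouched characters
    have hslice : PySem.List.slice s (some (prev : Int)) (some t.1) =
        List.take (i - prev) (List.drop prev s) := by
      rw [← hit, PySem.List.slice_natCast]
    rw [hslice]
    simp [Option.getD]

-- ===== VERDICT (by name: the statement is the Claim_ definition above) =====
theorem vnt_apply_spec : Claim_equal_vnt_apply := by
  intro seq vdic _ hpre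
  obtain ⟨hnd, hok⟩ := hpre
  unfold Spec_vnt_apply vnt_apply vnt_apply_alt
  show String.ofList (PySem.Chars.join [] (vdic.foldl (pvStepA seq.toList) (seq.toList.map (fun c => [c])))) =
    String.ofList (PySem.Chars.join []
        ((PySem.List.sorted (vdic.foldl (pvStepC seq.toList) []) (fun t => t.1)).foldl
          (pvStepS seq.toList) ([], 0)).1 ++
      PySem.List.slice seq.toList
        (some ((PySem.List.sorted (vdic.foldl (pvStepC seq.toList) []) (fun t => t.1)).foldl
          (pvStepS seq.toList) ([], 0)).2) none)
  set s := seq.toList with hs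
  -- run the joint loop invariant from the empty edit list
  have h0len : (s.map (fun c => [c])).length = s.length := by simp
  have h0inv : ∀ k : Nat, k < s.length →
      (s.map (fun c => [c])).getD k [] = (pvLk [] (k : Int)).getD [s.getD k ' '] := by
    intro k hk
    rw [List.getD_eq_getElem _ _ (by simpa using hk), List.getD_eq_getElem _ _ hk,
      List.getElem_map]
    rfl
  obtain ⟨hflen, hfinv, hndE, hbndE⟩ := pv_loop s vdic (s.map (fun c => [c])) []
    h0len h0inv (fun e _ => rfl) hnd hok ⟨by simp, by simp⟩
  set edits := vdic.foldl (pvStepC s) [] with he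
  set vsF := vdic.foldl (pvStepA s) (s.map (fun c => [c])) with hv
  -- A's final list, position by position
  have hA : vsF = (List.range s.length).map
      (fun k : Nat => (pvLk edits (k : Int)).getD [s.getD k ' ']) := by
    apply List.ext_getElem
    · simp [hflen]
    · intro k hk1 hk2
      have hks : k < s.length := by rwa [hflen] at hk1
      have := hfinv k hks
      rw [List.getD_eq_getElem _ _ hk1] at this
      rw [this, List.getElem_map, List.getElem_range]
  -- B's sorted edit list
  set sedits := PySem.List.sorted edits (fun t => t.1) with hse
  have hperm : sedits.Perm edits := PySem.List.sorted_perm edits (fun t => t.1) false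
  have hndS : (sedits.map (fun t => t.1)).Nodup := ((hperm.map _).nodup_iff).mpr hndE
  have hle : sedits.Pairwise (fun a b => a.1 ≤ b.1) := PySem.List.sorted_pairwise edits (fun t => t.1)
  have hneq : sedits.Pairwise (fun a b => a.1 ≠ b.1) := List.pairwise_map.mp hndS
  have hlt : sedits.Pairwise (fun a b => a.1 < b.1) :=
    (hle.and hneq).imp (fun h => lt_of_le_of_ne h.1 h.2)
  have hbndS : ∀ u ∈ sedits, ((0 : Nat) : Int) ≤ u.1 ∧ u.1 < (s.length : Int) := by
    intro u hu
    have := hbndE u (hperm.mem_iff.mp hu)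
    omega
  have hsp := pv_splice s sedits 0 [] hlt hbndS (by omega)
  rw [Nat.cast_zero] at hsp
  rw [hsp, PySem.Chars.join_nil, List.nil_append]
  -- lookups agree between the sorted and the collected edit lists
  have hlk : ∀ k : Int, pvLk sedits k = pvLk edits k := by
    intro k
    exact (pvLk_perm edits sedits k hperm.symm hndE).symm
  have hflat : (List.range' 0 (s.length - 0)).flatMap
      (fun k : Nat => (pvLk sedits (k : Int)).getD [s.getD k ' ']) =
      (List.range s.length).flatMap
      (fun k : Nat => (pvLk edits (k : Int)).getD [s.getD k ' ']) := by
    rw [List.range_eq_range', Nat.sub_zero, List.flatMap_def, List.flatMap_def]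
    congr 1
    apply List.map_congr_left
    intro k _
    rw [hlk]
  rw [hflat, hA, pv_join_nil_flatten, ← List.flatMap_def]
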